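-- pv_equiv track=rewrite | github.com/VeraBobrova/PY-111 | Tasks/h0_KMP.py | kmp_algo
-- ===== SOURCE A (Python) =====
-- from typing import Optional, List
--
-- def _prefix_fun(prefix_str: str) -> List[int]:
--     """
--     Prefix function for KMP
--
--     :param prefix_str: dubstring for prefix function
--     :return: prefix values table
--     """
--     """
--     1. Первый элемент префикс таблицы равен 0
--     2. Пока не будет достигнута граница шаблона вычисляем:
--     3. Если текущий символ суффикса равен текущему символу префикса, то в префикс таблицу записывается
--        размер префикса плюс один `pi[i] = j + 1`
--     4. Счетчики префикса и суффикса увеличиваем на один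
--     5. Иначе проверяем равен ли индекс префикса 0. Если да, то увеличиваем счетчик суффикса на один.
--        Иначе переносим счетчик префикса на индекс указанный в префикс-таблице `j = pi[j-1]`
--     """
--     pi = [0] * len(prefix_str)
--     j = 0
--     for i in range(1, len(prefix_str)):
--         while i < len(prefix_str):
--             if prefix_str[j] == prefix_str[i]:
--                 pi[i] = j + 1
--                 j += 1
--                 i += 1
--             else:
--                 if j == 0:
--                     i += 1
--                 else:
--                     j = pi[j - 1]
--         return pi
--
-- def kmp_algo(inp_string: str, substr: str) -> Optional[int]:
--     """
--     Implementation of Knuth-Morrison-Pratt algorithm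
--
--     :param inp_string: String where substr is to be found (haystack)
--     :param substr: substr to be found in inp_string (needle)
--     :return: index where first occurrence of substr in inp_string started or None if not found
--     """
--     """
--     1. Пока не дошли до конца строки
--     2. Сравниваем `i-й` элемент строки и `j-й` элемент шаблона
--     3. Если они равны - увеличиваем оба счетчика (и проверяем условие выхода)
--     4. Если не равны – значит мы нашли несовпадение где-то в середине шаблона, нужно вычислить,
--        с какого символа шаблона нужно продолжать. `j = pi[j-1]`
--     """
--     prefix_fun = _prefix_fun(substr)
--     i = 0
--     j = 0
--
--     while i < len(inp_string) and j < len(substr):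
--         if inp_string[i] == substr[j]:
--             i += 1
--             j += 1
--             if j == len(substr):
--                 return i - j
--         elif j == 0:
--             i += 1
--         else:
--             j = prefix_fun[j - 1]
-- ===== SOURCE B (Python) =====
-- def kmp_algo(inp_string, substr):
--     """Naive backtracking substring search: same result as the KMP version,
--     without the prefix-function table."""
--     start = 0
--     i = 0
--     j = 0
--     while i < len(inp_string) and j < len(substr):
--         if inp_string[i] == substr[j]:
--             i += 1
--             j += 1
--             if j == len(substr):
--                 return start
--         else:
--             start += 1
--             i = start
--             j = 0
--     return None
-- ===== Notes on version B (the rewrite author's own statement) =====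
-- stated objective: simpler
-- what changed: Replaced KMP (prefix-function table plus table-driven shift loop) by naive backtracking search with a start marker and two cursors; no helper, no table.
import Mathlib
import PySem

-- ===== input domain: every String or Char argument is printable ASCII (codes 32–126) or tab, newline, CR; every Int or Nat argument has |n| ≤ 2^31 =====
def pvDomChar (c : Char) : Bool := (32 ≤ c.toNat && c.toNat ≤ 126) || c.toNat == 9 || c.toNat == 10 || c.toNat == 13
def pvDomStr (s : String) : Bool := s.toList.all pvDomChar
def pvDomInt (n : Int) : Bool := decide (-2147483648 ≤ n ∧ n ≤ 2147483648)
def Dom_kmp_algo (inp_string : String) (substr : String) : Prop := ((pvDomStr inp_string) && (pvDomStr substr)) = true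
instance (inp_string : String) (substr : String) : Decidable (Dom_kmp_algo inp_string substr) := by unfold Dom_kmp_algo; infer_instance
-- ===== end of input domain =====

-- B replaces the KMP prefix-table search by plain naive backtracking search (simpler: no helper, no table).


-- ===== PORT A =====
-- Inner while-loop of Python's `_prefix_fun` (fuel only makes the recursion structural; every
-- reachable state has j < i < len, so the `getD`-indexing is exact Python indexing).
def pvPrefixLoop (t : List Char) (pi : List Nat) (j i fuel : Nat) : List Nat :=
  match fuel with
  | 0 => pi
  | f + 1 =>
    if i < t.length then
      if t.getD j ' ' = t.getD i ' ' then
        pvPrefixLoop t (pi.set i (j + 1)) (j + 1) (i + 1) f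
      else if j = 0 then
        pvPrefixLoop t pi j (i + 1) f
      else
        pvPrefixLoop t pi (pi.getD (j - 1) 0) i f
    else pi

-- Python's `_prefix_fun`: when len ≥ 2 the for-loop's first iteration runs the while to completion
-- and returns pi; when len < 2 the for-body never runs and the function falls off, returning None.
def pvPrefixFun (t : List Char) : Option (List Nat) :=
  if 1 < t.length then some (pvPrefixLoop t (List.replicate t.length 0) 0 1 (2 * t.length)) else none

-- Main while-loop of Python's `kmp_algo` (fuel for structural recursion; indices in range as above).
def pvKmpLoop (s t : List Char) (pf : List Nat) (i j fuel : Nat) : Option Int :=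
  match fuel with
  | 0 => none
  | f + 1 =>
    if i < s.length ∧ j < t.length then
      if s.getD i ' ' = t.getD j ' ' then
        if j + 1 = t.length then some (((i : Int) + 1) - ((j : Int) + 1))
        else pvKmpLoop s t pf (i + 1) (j + 1) f
      else if j = 0 then pvKmpLoop s t pf (i + 1) j f
      else pvKmpLoop s t pf i (pf.getD (j - 1) 0) f
    else none

def kmp_algo (inp_string : String) (substr : String) : Option Int :=
  let s := inp_string.toList
  let t := substr.toList
  -- Python binds prefix_fun (possibly None); it is only indexed when len(substr) ≥ 2, where it is a list
  let pf := (pvPrefixFun t).getD []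
  pvKmpLoop s t pf 0 0 (2 * s.length + 1)

-- ===== PORT B =====
-- Source B's single while-loop: naive backtracking with a start marker (fuel for structural recursion).
def pvNaiveLoop (s t : List Char) (start i j fuel : Nat) : Option Int :=
  match fuel with
  | 0 => none
  | f + 1 =>
    if i < s.length ∧ j < t.length then
      if s.getD i ' ' = t.getD j ' ' then
        if j + 1 = t.length then some (start : Int)
        else pvNaiveLoop s t start (i + 1) (j + 1) f
      else pvNaiveLoop s t (start + 1) (start + 1) 0 f
    else none

def kmp_algo_alt (inp_string : String) (substr : String) : Option Int :=
  pvNaiveLoop inp_string.toList substr.toList 0 0 0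
    ((inp_string.toList.length + 1) * (substr.toList.length + 1))

-- ===== PRECONDITION & SPEC =====
def Spec_kmp_algo (inp_string : String) (substr : String) (out : Option Int) : Prop := out = kmp_algo_alt inp_string substr
instance (inp_string : String) (substr : String) (out : Option Int) : Decidable (Spec_kmp_algo inp_string substr out) := by unfold Spec_kmp_algo; infer_instance

-- ===== CLAIM (what is proved, stated in full; the proofs are below) =====
def Claim_equal_kmp_algo : Prop := ∀ (inp_string : String) (substr : String), Dom_kmp_algo inp_string substr → Spec_kmp_algo inp_string substr (kmp_algo inp_string substr)

-- ===== LEMMAS AND PROOFS =====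

-- `pvSeg x y p j`: the j chars of x starting at p equal the first j chars of y.
def pvSeg (x y : List Char) (p j : Nat) : Prop := (x.drop p).take j = y.take j

-- occurrence of t at position p of s
def pvOcc (s t : List Char) (p : Nat) : Prop := p + t.length ≤ s.length ∧ pvSeg s t p t.length

-- index of the first occurrence of t in s (t nonempty)
def pvFirstMatch (s t : List Char) : Option Nat :=
  (List.range s.length).find? (fun k => decide (k + t.length ≤ s.length ∧ (s.drop k).take t.length = t))

-- b is a (proper) border of t.take m
def pvBord (t : List Char) (m b : Nat) : Prop := b < m ∧ pvSeg t t (m - b) b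

-- b is the longest border of t.take m
def pvIsLB (t : List Char) (m b : Nat) : Prop := pvBord t m b ∧ ∀ c, pvBord t m c → c ≤ b

-- the prefix table pf is correct below k
def pvPiOK (t : List Char) (pf : List Nat) (k : Nat) : Prop := ∀ m, m < k → pvIsLB t (m + 1) (pf.getD m 0)

theorem pvSeg_zero (x y : List Char) (p : Nat) : pvSeg x y p 0 := by simp [pvSeg]

theorem pvSeg_len {x y : List Char} {p j : Nat} (h : pvSeg x y p j) (hj : j ≤ y.length)
    (hj0 : 0 < j) : p + j ≤ x.length := by
  have := congrArg List.length h
  simp at this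
  omega

theorem pvSeg_mono {x y : List Char} {p j b : Nat} (h : pvSeg x y p j) (hb : b ≤ j) :
    pvSeg x y p b := by
  have := congrArg (List.take b) h
  simpa [pvSeg, List.take_take, Nat.min_eq_left hb] using this

theorem pvSeg_succ_iff {x y : List Char} {p j : Nat} (hx : p + j < x.length) (hy : j < y.length) :
    pvSeg x y p (j + 1) ↔ (pvSeg x y p j ∧ x.getD (p + j) ' ' = y.getD j ' ') := by
  unfold pvSeg
  rw [List.take_add_one, List.take_add_one]
  have hx1 : (x.drop p)[j]? = some x[p + j] := by
    rw [List.getElem?_drop, List.getElem?_eq_getElem hx]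
  have hy1 : y[j]? = some y[j] := List.getElem?_eq_getElem hy
  rw [hx1, hy1]
  have hlx : ((x.drop p).take j).length = j := by simp; omega
  have hly : (y.take j).length = j := by simp; omega
  constructor
  · intro h
    have := List.append_inj h (by rw [hlx, hly])
    refine ⟨this.1, ?_⟩
    have h2 := this.2
    simp at h2
    rw [List.getD_eq_getElem x ' ' hx, List.getD_eq_getElem y ' ' hy, h2]
  · rintro ⟨h1, h2⟩
    rw [h1]
    rw [List.getD_eq_getElem x ' ' hx, List.getD_eq_getElem y ' ' hy] at h2
    rw [h2]

theorem pvSeg_shift {x y : List Char} {p j b : Nat} (h : pvSeg x y p j) (hb : b ≤ j) :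
    pvSeg y y (j - b) b ↔ pvSeg x y (p + (j - b)) b := by
  have h2 := congrArg (List.drop (j - b)) h
  rw [List.drop_take, List.drop_take, List.drop_drop] at h2
  have hb' : j - (j - b) = b := by omega
  rw [hb'] at h2
  unfold pvSeg
  rw [h2]

theorem pvBord_succ_iff {t : List Char} {i c : Nat} (hi : i < t.length) (hc : c < i) :
    pvBord t (i + 1) (c + 1) ↔ (pvBord t i c ∧ t.getD c ' ' = t.getD i ' ') := by
  unfold pvBord
  have e1 : i + 1 - (c + 1) = i - c := by omega
  rw [e1]
  rw [pvSeg_succ_iff (x := t) (y := t) (p := i - c) (j := c) (by omega) (by omega)]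
  have e2 : i - c + c = i := by omega
  rw [e2]
  constructor
  · rintro ⟨h1, h2, h3⟩; exact ⟨⟨by omega, h2⟩, h3.symm⟩
  · rintro ⟨⟨h1, h2⟩, h3⟩; exact ⟨by omega, h2, h3.symm⟩

theorem pvOcc_getD {s t : List Char} {p j : Nat} (h : pvOcc s t p) (hj : j < t.length) :
    s.getD (p + j) ' ' = t.getD j ' ' := by
  have h1 : pvSeg s t p (j + 1) := pvSeg_mono h.2 (by omega)
  have hlen : p + (j + 1) ≤ s.length := pvSeg_len h1 (by omega) (by omega)
  exact ((pvSeg_succ_iff (by omega) hj).mp h1).2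

theorem pv_find?_range_some {P : Nat → Bool} {n k : Nat} (hk : k < n) (hP : P k = true)
    (hmin : ∀ p, p < k → ¬ P p = true) : (List.range n).find? P = some k := by
  induction n with
  | zero => omega
  | succ n ih =>
    rw [List.range_succ, List.find?_append]
    by_cases h : k < n
    · rw [ih h]; rfl
    · have hkn : k = n := by omega
      subst hkn
      have hn : (List.range k).find? P = none :=
        List.find?_eq_none.mpr (fun x hx => hmin x (List.mem_range.mp hx))
      rw [hn]
      simp [List.find?, hP]

theorem pvOcc_iff_pred {s t : List Char} {k : Nat} :
    pvOcc s t k ↔ (decide (k + t.length ≤ s.length ∧ (s.drop k).take t.length = t) = true) := by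
  simp [pvOcc, pvSeg, List.take_length]

theorem pvFirstMatch_some {s t : List Char} {k : Nat} (ht : 0 < t.length)
    (hocc : pvOcc s t k) (hmin : ∀ p, p < k → ¬ pvOcc s t p) :
    pvFirstMatch s t = some k := by
  apply pv_find?_range_some (by have := hocc.1; omega) (pvOcc_iff_pred.mp hocc)
  intro p hp hP
  exact hmin p hp (pvOcc_iff_pred.mpr hP)

theorem pvFirstMatch_none {s t : List Char} (h : ∀ p, ¬ pvOcc s t p) :
    pvFirstMatch s t = none := by
  apply List.find?_eq_none.mpr
  intro x _ hP
  exact h x (pvOcc_iff_pred.mpr hP)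

-- invariant of the prefix-function loop
def pvPfInv (t : List Char) (pi : List Nat) (j i : Nat) : Prop :=
  1 ≤ i ∧ i ≤ t.length ∧ j < i ∧ pi.length = t.length ∧
  pvPiOK t pi i ∧ (∀ m, i ≤ m → pi.getD m 0 = 0) ∧
  pvSeg t t (i - j) j ∧
  (∀ c, pvBord t i c → t.getD c ' ' = t.getD i ' ' → c ≤ j)

theorem pvPrefixLoop_ok {t : List Char} :
    ∀ fuel pi j i, pvPfInv t pi j i → 2 * (t.length - i) + j < fuel →
      pvPiOK t (pvPrefixLoop t pi j i fuel) t.length := by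
  intro fuel
  induction fuel with
  | zero => intro pi j i _ hf; omega
  | succ f ih =>
    intro pi j i hinv hf
    obtain ⟨hi1, hin, hji, hlen, hok, hzero, hseg, hmax⟩ := hinv
    by_cases hi : i < t.length
    · simp only [pvPrefixLoop, if_pos hi]
      by_cases heq : t.getD j ' ' = t.getD i ' '
      · -- match: pi[i] := j+1, j+1, i+1
        rw [if_pos heq]
        -- the new table entry is the longest border of t.take (i+1)
        have hsegn : pvSeg t t (i - j) (j + 1) := by
          rw [pvSeg_succ_iff (by omega) (by omega)]
          have e : i - j + j = i := by omega
          rw [e]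
          exact ⟨hseg, heq.symm⟩
        have hlb : pvIsLB t (i + 1) (j + 1) := by
          constructor
          · refine ⟨by omega, ?_⟩
            have e : i + 1 - (j + 1) = i - j := by omega
            rw [e]; exact hsegn
          · intro c hc
            cases c with
            | zero => omega
            | succ c' =>
              have hc' : c' < i := by have := hc.1; omega
              have := (pvBord_succ_iff hi hc').mp hc
              have := hmax c' this.1 this.2
              omega
        apply ih
        · refine ⟨by omega, by omega, by omega, by simpa using hlen, ?_, ?_, ?_, ?_⟩
          · intro m hm
            by_cases hmi : m = i
            · subst hmi
              have : (pi.set m (j + 1)).getD m 0 = j + 1 := by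
                rw [List.getD_eq_getElem?_getD, List.getElem?_set_self (by omega)]
                rfl
              rw [this]
              exact hlb
            · have : (pi.set i (j + 1)).getD m 0 = pi.getD m 0 := by
                rw [List.getD_eq_getElem?_getD, List.getElem?_set_ne (by omega),
                  ← List.getD_eq_getElem?_getD]
              rw [this]
              exact hok m (by omega)
          · intro m hm
            have : (pi.set i (j + 1)).getD m 0 = pi.getD m 0 := by
              rw [List.getD_eq_getElem?_getD, List.getElem?_set_ne (by omega),
                ← List.getD_eq_getElem?_getD]
            rw [this]
            exact hzero m (by omega)
          · have e : i + 1 - (j + 1) = i - j := by omega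
            rw [e]; exact hsegn
          · intro c hc _
            exact hlb.2 c hc
        · omega
      · rw [if_neg heq]
        by_cases hj0 : j = 0
        · -- mismatch at j = 0: pi[i] stays 0, advance i
          subst hj0
          rw [if_pos rfl]
          have hlb : pvIsLB t (i + 1) 0 := by
            constructor
            · exact ⟨by omega, pvSeg_zero t t (i + 1)⟩
            · intro c hc
              cases c with
              | zero => omega
              | succ c' =>
                have hc' : c' < i := by have := hc.1; omega
                have h2 := (pvBord_succ_iff hi hc').mp hc
                have hc0 : c' = 0 := by have := hmax c' h2.1 h2.2; omega
                subst hc0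
                exact absurd h2.2 heq
          apply ih
          · refine ⟨by omega, by omega, by omega, hlen, ?_, ?_, pvSeg_zero t t (i + 1), ?_⟩
            · intro m hm
              by_cases hmi : m = i
              · subst hmi
                rw [hzero m (by omega)]
                exact hlb
              · exact hok m (by omega)
            · intro m hm
              exact hzero m (by omega)
            · intro c hc _
              exact hlb.2 c hc
          · omega
        · -- mismatch, j > 0: j := pi[j-1], the longest border of t.take j
          rw [if_neg hj0]
          have hlb : pvIsLB t j (pi.getD (j - 1) 0) := by
            have := hok (j - 1) (by omega)
            have e : j - 1 + 1 = j := by omega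
            rwa [e] at this
          set j' := pi.getD (j - 1) 0 with hj'
          have hj'j : j' < j := hlb.1.1
          apply ih
          · refine ⟨by omega, by omega, by omega, hlen, hok, hzero, ?_, ?_⟩
            · have h1 : pvSeg t t (j - j') j' := hlb.1.2
              have h2 := (pvSeg_shift hseg (by omega)).mp h1
              have e : i - j + (j - j') = i - j' := by omega
              rwa [e] at h2
            · intro c hc hcd
              have hcj := hmax c hc hcd
              rcases Nat.lt_or_ge c j with hlt | hge
              · -- c is a border of t.take j, hence ≤ its longest border j'
                apply hlb.2
                refine ⟨hlt, ?_⟩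
                rw [pvSeg_shift hseg (by omega)]
                have e : i - j + (j - c) = i - c := by omega
                rw [e]
                exact hc.2
              · exfalso
                have hcj' : c = j := by omega
                subst hcj'
                exact heq hcd
          · omega
    · simp only [pvPrefixLoop, if_neg hi]
      have : i = t.length := by omega
      subst this
      exact hok

theorem pvPiOK_all (t : List Char) : pvPiOK t ((pvPrefixFun t).getD []) t.length := by
  unfold pvPrefixFun
  by_cases h : 1 < t.length
  · rw [if_pos h]
    apply pvPrefixLoop_ok (i := 1) (j := 0) (pi := List.replicate t.length 0)
    · refine ⟨le_refl 1, by omega, by omega, by simp, ?_, ?_, pvSeg_zero t t 1, ?_⟩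
      · intro m hm
        have hm0 : m = 0 := by omega
        subst hm0
        have : (List.replicate t.length (0 : Nat)).getD 0 0 = 0 := by simp [List.getD]
        rw [this]
        exact ⟨⟨by omega, pvSeg_zero t t 1⟩, fun c hc => by have := hc.1; omega⟩
      · intro m _
        simp [List.getD]
      · intro c hc _
        have := hc.1; omega
    · omega
  · rw [if_neg h]
    intro m hm
    have hm0 : m = 0 ∧ t.length = 1 := by omega
    obtain ⟨hm0, _⟩ := hm0
    subst hm0
    exact ⟨⟨by decide, pvSeg_zero t t 1⟩, fun c hc => by have := hc.1; omega⟩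

theorem pvKmpLoop_eq {s t : List Char} {pf : List Nat} (hpf : pvPiOK t pf t.length)
    (ht : 0 < t.length) :
    ∀ fuel i j, j ≤ i → i ≤ s.length → j < t.length → pvSeg s t (i - j) j →
      (∀ p, p < i - j → ¬ pvOcc s t p) → 2 * (s.length - i) + j < fuel →
      pvKmpLoop s t pf i j fuel = (pvFirstMatch s t).map (fun k => (k : Int)) := by
  intro fuel
  induction fuel with
  | zero => intro i j _ _ _ _ _ hf; omega
  | succ f ih =>
    intro i j hji his hjt hseg hno hf
    by_cases hi : i < s.length
    · simp only [pvKmpLoop, if_pos (⟨hi, hjt⟩ : i < s.length ∧ j < t.length)]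
      by_cases heq : s.getD i ' ' = t.getD j ' '
      · rw [if_pos heq]
        have hsegn : pvSeg s t (i - j) (j + 1) := by
          rw [pvSeg_succ_iff (by omega) hjt]
          have e : i - j + j = i := by omega
          rw [e]
          exact ⟨hseg, heq⟩
        by_cases hend : j + 1 = t.length
        · rw [if_pos hend]
          have hocc : pvOcc s t (i - j) := by
            refine ⟨by omega, ?_⟩
            rw [← hend]
            exact hsegn
          rw [pvFirstMatch_some ht hocc (fun p hp => hno p hp)]
          simp only [Option.map]
          congr 1
          omega
        · rw [if_neg hend]
          apply ih (i + 1) (j + 1) (by omega) (by omega) (by omega)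
          · have e : i + 1 - (j + 1) = i - j := by omega
            rw [e]; exact hsegn
          · intro p hp
            exact hno p (by omega)
          · omega
      · rw [if_neg heq]
        by_cases hj0 : j = 0
        · subst hj0
          rw [if_pos rfl]
          apply ih (i + 1) 0 (by omega) (by omega) ht (pvSeg_zero s t (i + 1))
          · intro p hp
            by_cases hpi : p < i
            · exact hno p (by omega)
            · have hpe : p = i := by omega
              subst hpe
              intro hocc
              exact heq (by simpa using pvOcc_getD hocc ht)
          · omega
        · rw [if_neg hj0]
          have hlb : pvIsLB t j (pf.getD (j - 1) 0) := by
            have := hpf (j - 1) (by omega)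
            have e : j - 1 + 1 = j := by omega
            rwa [e] at this
          set j' := pf.getD (j - 1) 0 with hj'
          have hj'j : j' < j := hlb.1.1
          apply ih i j' (by omega) his (by omega)
          · have h1 : pvSeg t t (j - j') j' := hlb.1.2
            have h2 := (pvSeg_shift hseg (by omega)).mp h1
            have e : i - j + (j - j') = i - j' := by omega
            rwa [e] at h2
          · intro p hp hocc
            by_cases hp1 : p < i - j
            · exact hno p hp1 hocc
            · by_cases hp2 : p = i - j
              · subst hp2
                apply heq
                have := pvOcc_getD hocc hjt
                have e : i - j + j = i := by omega
                rwa [e] at this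
              · -- i - j < p < i - j' : c := i - p would be a border of t.take j longer than j'
                have hci : p < i := by omega
                have hcj : i - p < j := by omega
                have hcj' : j' < i - p := by omega
                have hb : pvBord t j (i - p) := by
                  refine ⟨hcj, ?_⟩
                  rw [pvSeg_shift hseg (by omega)]
                  have e : i - j + (j - (i - p)) = p := by omega
                  rw [e]
                  exact pvSeg_mono hocc.2 (by have := hocc.1; omega)
                have := hlb.2 (i - p) hb
                omega
          · omega
    · simp only [pvKmpLoop]
      rw [if_neg (by omega : ¬ (i < s.length ∧ j < t.length))]
      rw [pvFirstMatch_none ?_]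
      · rfl
      · intro p hocc
        by_cases hp : p < i - j
        · exact hno p hp hocc
        · have h1 := hocc.1
          omega

theorem pvNaiveLoop_eq {s t : List Char} (ht : 0 < t.length) :
    ∀ fuel start j, start + j ≤ s.length → j < t.length → pvSeg s t start j →
      (∀ p, p < start → ¬ pvOcc s t p) →
      (s.length - start) * (t.length + 1) + (t.length - j) < fuel →
      pvNaiveLoop s t start (start + j) j fuel = (pvFirstMatch s t).map (fun k => (k : Int)) := by
  intro fuel
  induction fuel with
  | zero => intro start j _ _ _ _ hf; omega
  | succ f ih =>
    intro start j hsj hjt hseg hno hf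
    by_cases hi : start + j < s.length
    · simp only [pvNaiveLoop, if_pos (⟨hi, hjt⟩ : start + j < s.length ∧ j < t.length)]
      by_cases heq : s.getD (start + j) ' ' = t.getD j ' '
      · rw [if_pos heq]
        have hsegn : pvSeg s t start (j + 1) := by
          rw [pvSeg_succ_iff hi hjt]
          exact ⟨hseg, heq⟩
        by_cases hend : j + 1 = t.length
        · rw [if_pos hend]
          have hocc : pvOcc s t start := by
            refine ⟨by omega, ?_⟩
            rw [← hend]
            exact hsegn
          rw [pvFirstMatch_some ht hocc hno]
          rfl
        · rw [if_neg hend]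
          have := ih start (j + 1) (by omega) (by omega) hsegn hno (by omega)
          have e : start + j + 1 = start + (j + 1) := by omega
          rwa [e]
      · rw [if_neg heq]
        have hno' : ∀ p, p < start + 1 → ¬ pvOcc s t p := by
          intro p hp
          by_cases hps : p < start
          · exact hno p hps
          · have hpe : p = start := by omega
            subst hpe
            intro hocc
            exact heq (pvOcc_getD hocc hjt)
        have hfuel : (s.length - (start + 1)) * (t.length + 1) + (t.length - 0) < f := by
          have e1 : s.length - start = (s.length - (start + 1)) + 1 := by omega
          rw [e1, Nat.add_mul, Nat.one_mul] at hf
          omega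
        have := ih (start + 1) 0 (by omega) ht (pvSeg_zero s t (start + 1)) hno' hfuel
        have e : start + 1 + 0 = start + 1 := by omega
        rwa [e] at this
    · simp only [pvNaiveLoop]
      rw [if_neg (by omega : ¬ (start + j < s.length ∧ j < t.length))]
      rw [pvFirstMatch_none ?_]
      · rfl
      · intro p hocc
        by_cases hp : p < start
        · exact hno p hp hocc
        · have h1 := hocc.1
          omega

theorem pvKmpLoop_nil {s t : List Char} {pf : List Nat} {i j : Nat} (h : t.length = 0) :
    ∀ fuel, pvKmpLoop s t pf i j fuel = none := by
  intro fuel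
  cases fuel with
  | zero => rfl
  | succ f => simp [pvKmpLoop, h]

theorem pvNaiveLoop_nil {s t : List Char} {start i j : Nat} (h : t.length = 0) :
    ∀ fuel, pvNaiveLoop s t start i j fuel = none := by
  intro fuel
  cases fuel with
  | zero => rfl
  | succ f => simp [pvNaiveLoop, h]

theorem kmp_algo_eq_alt (inp_string : String) (substr : String) :
    kmp_algo inp_string substr = kmp_algo_alt inp_string substr := by
  unfold kmp_algo kmp_algo_alt
  set s := inp_string.toList
  set t := substr.toList
  by_cases ht : t.length = 0
  · rw [pvKmpLoop_nil ht, pvNaiveLoop_nil ht]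
  · have ht' : 0 < t.length := by omega
    rw [pvKmpLoop_eq (pvPiOK_all t) ht' (2 * s.length + 1) 0 0 (le_refl 0) (by omega) ht'
      (pvSeg_zero s t 0) (fun p hp => by omega) (by omega)]
    have := pvNaiveLoop_eq (s := s) ht' ((s.length + 1) * (t.length + 1)) 0 0 (by omega) ht'
      (pvSeg_zero s t 0) (fun p hp => by omega)
      (by simp only [Nat.sub_zero]; rw [Nat.add_mul, Nat.one_mul]; omega)
    simpa using this.symm

-- ===== VERDICT (by name: the statement is the Claim_ definition above) =====
theorem kmp_algo_spec : Claim_equal_kmp_algo := by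
  intro inp_string substr _
  unfold Spec_kmp_algo
  exact kmp_algo_eq_alt inp_string substr
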